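-- pv_equiv track=rewrite | github.com/VikiDinkova/HackBulgaria | Programming0-1/week4/winter.py | winter_is_coming
-- ===== SOURCE A (Python) =====
-- def winter_is_coming(seasons):
-- 	counter = 0
-- 	for season in seasons:
-- 		if season != 'winter':
-- 			counter += 1
-- 		else:
-- 			counter = 0
-- 	if counter >= 5:
-- 		return True
-- 	else:
-- 		return False
--
-- seasons = ["winter", "summer", "summer", "summer", "spring", "srping"]
-- ===== SOURCE B (Python) =====
-- def winter_is_coming(seasons):
--     seasons = list(seasons)
--     count = 0
--     for season in reversed(seasons):
--         if season == 'winter':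
--             break
--         count += 1
--     return count >= 5
-- ===== Notes on version B (the rewrite author's own statement) =====
-- stated objective: simpler
-- what changed: Instead of folding a reset-on-winter counter over the whole list, B scans the reversed list and counts the tail run of non-winter seasons, stopping at the first 'winter'.
import Mathlib
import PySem

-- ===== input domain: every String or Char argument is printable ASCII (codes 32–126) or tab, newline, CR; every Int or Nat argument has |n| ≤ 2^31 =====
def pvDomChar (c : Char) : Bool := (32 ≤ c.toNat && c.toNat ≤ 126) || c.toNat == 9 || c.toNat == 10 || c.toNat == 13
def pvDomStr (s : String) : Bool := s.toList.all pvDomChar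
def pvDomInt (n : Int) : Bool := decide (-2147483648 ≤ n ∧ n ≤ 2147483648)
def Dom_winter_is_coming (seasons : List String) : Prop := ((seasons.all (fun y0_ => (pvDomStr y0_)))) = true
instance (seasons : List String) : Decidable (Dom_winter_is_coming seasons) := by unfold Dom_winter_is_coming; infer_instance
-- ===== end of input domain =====

-- B replaces A's reset-on-winter counter fold by a reverse scan that counts the tail run of non-winter seasons (objective: simpler).


-- ===== PORT A =====
def winter_is_coming (seasons : List String) : Bool :=
  let counter : Int := seasons.foldl (fun counter season =>
    if season ≠ "winter" then counter + 1 else 0) 0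
  if counter ≥ 5 then true else false

-- ===== PORT B =====
-- reversed loop with break: count leading non-'winter' entries of the reversed list
def pvTailRun : List String → Int
  | [] => 0
  | season :: rest => if season == "winter" then 0 else 1 + pvTailRun rest

def winter_is_coming_alt (seasons : List String) : Bool :=
  decide (pvTailRun seasons.reverse ≥ 5)

-- ===== PRECONDITION & SPEC =====
def Spec_winter_is_coming (seasons : List String) (out : Bool) : Prop := out = winter_is_coming_alt seasons
instance (seasons : List String) (out : Bool) : Decidable (Spec_winter_is_coming seasons out) := by unfold Spec_winter_is_coming; infer_instance

-- ===== CLAIM (what is proved, stated in full; the proofs are below) =====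
def Claim_equal_winter_is_coming : Prop := ∀ (seasons : List String), Dom_winter_is_coming seasons → Spec_winter_is_coming seasons (winter_is_coming seasons)

-- ===== LEMMAS AND PROOFS =====
theorem pv_fold_eq_tailRun (xs : List String) :
    xs.foldl (fun counter season => if season ≠ "winter" then counter + 1 else 0) (0 : Int)
      = pvTailRun xs.reverse := by
  induction xs using List.reverseRecOn with
  | nil => rfl
  | append_singleton xs a ih =>
      rw [List.foldl_append, List.reverse_append]
      simp only [List.foldl_cons, List.foldl_nil, List.reverse_singleton, List.singleton_append,
        pvTailRun]
      by_cases h : a = "winter"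
      · simp [h]
      · simp only [ih] at *
        simp [h]
        omega

-- ===== VERDICT (by name: the statement is the Claim_ definition above) =====
theorem winter_is_coming_spec : Claim_equal_winter_is_coming := by
  intro seasons _
  unfold Spec_winter_is_coming winter_is_coming winter_is_coming_alt
  rw [pv_fold_eq_tailRun]
  by_cases h : pvTailRun seasons.reverse ≥ 5 <;> simp [h]
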